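-- pv_equiv track=rewrite | github.com/adamritter/lazyviewer | lazyviewer/render/__init__.py | _status_line_range
-- ===== SOURCE A (Python) =====
-- def _line_has_newline_terminator(line: str) -> bool:
--     return line.endswith("\n") or line.endswith("\r")
--
-- def _status_line_range(
--     text_lines: list[str],
--     text_start: int,
--     content_rows: int,
--     wrap_text: bool,
-- ) -> tuple[int, int, int]:
--     if not text_lines:
--         return 1, 1, 1
--
--     if not wrap_text:
--         total = len(text_lines)
--         clamped_start = max(0, min(text_start, total - 1))
--         end = min(total, clamped_start + max(1, content_rows))
--         return clamped_start + 1, end, total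
--
--     display_to_source: list[int] = []
--     source_line = 1
--     for line in text_lines:
--         display_to_source.append(source_line)
--         if _line_has_newline_terminator(line):
--             source_line += 1
--
--     if _line_has_newline_terminator(text_lines[-1]):
--         total_source_lines = max(1, source_line - 1)
--     else:
--         total_source_lines = max(1, source_line)
--
--     clamped_start = max(0, min(text_start, len(text_lines) - 1))
--     clamped_end = max(clamped_start, min(len(text_lines) - 1, clamped_start + max(1, content_rows) - 1))
--     start_source = display_to_source[clamped_start]
--     end_source = display_to_source[clamped_end]
--     return start_source, end_source, total_source_lines
-- ===== SOURCE B (Python) =====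
-- def _line_has_newline_terminator(line: str) -> bool:
--     return line.endswith("\n") or line.endswith("\r")
--
--
-- def _status_line_range(
--     text_lines: list[str],
--     text_start: int,
--     content_rows: int,
--     wrap_text: bool,
-- ) -> tuple[int, int, int]:
--     if not text_lines:
--         return 1, 1, 1
--
--     total = len(text_lines)
--     clamped_start = max(0, min(text_start, total - 1))
--
--     if not wrap_text:
--         end = min(total, clamped_start + max(1, content_rows))
--         return clamped_start + 1, end, total
--
--     clamped_end = max(clamped_start, min(total - 1, clamped_start + max(1, content_rows) - 1))
--     start_source = 1 + sum(_line_has_newline_terminator(l) for l in text_lines[:clamped_start])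
--     end_source = 1 + sum(_line_has_newline_terminator(l) for l in text_lines[:clamped_end])
--     terminators = sum(_line_has_newline_terminator(l) for l in text_lines)
--     if _line_has_newline_terminator(text_lines[-1]):
--         total_source_lines = max(1, terminators)
--     else:
--         total_source_lines = max(1, terminators + 1)
--     return start_source, end_source, total_source_lines
-- ===== Notes on version B (the rewrite author's own statement) =====
-- stated objective: simpler
-- what changed: The wrap branch no longer builds the display_to_source mapping list and a running counter; it computes the two needed entries directly as 1 + the count of newline-terminated lines in the prefix before each clamped index, and the total from one count over all lines.
import Mathlib
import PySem

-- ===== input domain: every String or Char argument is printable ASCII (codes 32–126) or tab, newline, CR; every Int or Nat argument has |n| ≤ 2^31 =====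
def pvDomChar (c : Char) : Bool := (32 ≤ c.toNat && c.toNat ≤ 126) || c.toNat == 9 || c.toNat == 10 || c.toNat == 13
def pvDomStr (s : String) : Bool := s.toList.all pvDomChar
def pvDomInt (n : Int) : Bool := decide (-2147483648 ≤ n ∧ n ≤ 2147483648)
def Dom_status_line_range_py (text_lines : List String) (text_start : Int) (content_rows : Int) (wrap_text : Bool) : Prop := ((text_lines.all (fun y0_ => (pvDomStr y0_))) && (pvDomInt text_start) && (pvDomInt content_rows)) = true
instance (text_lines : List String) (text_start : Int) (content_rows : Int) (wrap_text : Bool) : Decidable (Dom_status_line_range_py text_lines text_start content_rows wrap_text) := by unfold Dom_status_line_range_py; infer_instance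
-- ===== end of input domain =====

-- B removes A's display_to_source list and running counter: it counts terminated lines
-- in the relevant prefixes directly (objective: simpler).


-- ===== PORT A =====
def lineHasNewlineTerminator (line : String) : Bool :=
  PySem.Str.endswith line "\n" || PySem.Str.endswith line "\r"

def status_line_range_py (text_lines : List String) (text_start : Int) (content_rows : Int) (wrap_text : Bool) : Int × Int × Int :=
  if text_lines = [] then (1, 1, 1)
  else if !wrap_text then
    let total : Int := text_lines.length
    let clamped_start := max 0 (min text_start (total - 1))
    let e := min total (clamped_start + max 1 content_rows)
    (clamped_start + 1, e, total)
  else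
    -- the for loop building display_to_source together with source_line
    let p := text_lines.foldl
      (fun (p : List Int × Int) line =>
        (p.1 ++ [p.2], if lineHasNewlineTerminator line then p.2 + 1 else p.2))
      ([], 1)
    let display_to_source := p.1
    let source_line := p.2
    -- text_lines[-1]: in range (list nonempty), so pyGetD is exact here
    let total_source_lines :=
      if lineHasNewlineTerminator (PySem.List.pyGetD text_lines (-1) "") then
        max 1 (source_line - 1)
      else max 1 source_line
    let clamped_start := max 0 (min text_start ((text_lines.length : Int) - 1))
    let clamped_end := max clamped_start (min ((text_lines.length : Int) - 1) (clamped_start + max 1 content_rows - 1))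
    -- indices are clamped into range, so pyGetD is exact here
    let start_source := PySem.List.pyGetD display_to_source clamped_start 0
    let end_source := PySem.List.pyGetD display_to_source clamped_end 0
    (start_source, end_source, total_source_lines)

-- ===== PORT B =====
-- sum(_line_has_newline_terminator(l) for l in ls)
def termSum (ls : List String) : Int :=
  ls.foldl (fun a l => a + (if lineHasNewlineTerminator l then 1 else 0)) 0

def status_line_range_py_alt (text_lines : List String) (text_start : Int) (content_rows : Int) (wrap_text : Bool) : Int × Int × Int :=
  if text_lines = [] then (1, 1, 1)
  else
    let total : Int := text_lines.length
    let clamped_start := max 0 (min text_start (total - 1))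
    if !wrap_text then
      (clamped_start + 1, min total (clamped_start + max 1 content_rows), total)
    else
      let clamped_end := max clamped_start (min (total - 1) (clamped_start + max 1 content_rows - 1))
      let start_source := 1 + termSum (PySem.List.slice text_lines none (some clamped_start))
      let end_source := 1 + termSum (PySem.List.slice text_lines none (some clamped_end))
      let terminators := termSum text_lines
      let total_source_lines :=
        if lineHasNewlineTerminator (PySem.List.pyGetD text_lines (-1) "") then
          max 1 terminators
        else max 1 (terminators + 1)
      (start_source, end_source, total_source_lines)

-- ===== PRECONDITION & SPEC =====
def Spec_status_line_range_py (text_lines : List String) (text_start : Int) (content_rows : Int) (wrap_text : Bool) (out : Int × Int × Int) : Prop := out = status_line_range_py_alt text_lines text_start content_rows wrap_text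
instance (text_lines : List String) (text_start : Int) (content_rows : Int) (wrap_text : Bool) (out : Int × Int × Int) : Decidable (Spec_status_line_range_py text_lines text_start content_rows wrap_text out) := by unfold Spec_status_line_range_py; infer_instance

-- ===== CLAIM (what is proved, stated in full; the proofs are below) =====
def Claim_equal_status_line_range_py : Prop := ∀ (text_lines : List String) (text_start : Int) (content_rows : Int) (wrap_text : Bool), Dom_status_line_range_py text_lines text_start content_rows wrap_text → Spec_status_line_range_py text_lines text_start content_rows wrap_text (status_line_range_py text_lines text_start content_rows wrap_text)

-- ===== LEMMAS AND PROOFS =====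

-- cnt: structural count of terminated lines
def cnt : List String → Int
  | [] => 0
  | l :: ls => (if lineHasNewlineTerminator l then 1 else 0) + cnt ls

theorem termSum_foldl (ls : List String) (a : Int) :
    ls.foldl (fun a l => a + (if lineHasNewlineTerminator l then 1 else 0)) a = a + cnt ls := by
  induction ls generalizing a with
  | nil => simp [cnt]
  | cons l ls ih => simp [List.foldl, cnt, ih]; ring

theorem termSum_eq (ls : List String) : termSum ls = cnt ls := by
  simpa using termSum_foldl ls 0

-- pref s ls: partial sums list starting at s (what A's loop appends)
def pref (s : Int) : List String → List Int
  | [] => []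
  | l :: ls => s :: pref (s + (if lineHasNewlineTerminator l then 1 else 0)) ls

theorem foldA (ls : List String) (acc : List Int) (s : Int) :
    ls.foldl (fun (p : List Int × Int) line =>
        (p.1 ++ [p.2], if lineHasNewlineTerminator line then p.2 + 1 else p.2)) (acc, s)
    = (acc ++ pref s ls, s + cnt ls) := by
  induction ls generalizing acc s with
  | nil => simp [pref, cnt]
  | cons l ls ih =>
    simp only [List.foldl, pref, cnt, ih, Prod.mk.injEq]
    refine ⟨by split <;> simp, by split <;> ring⟩

theorem pref_getD (ls : List String) (s : Int) (i : Nat) (h : i < ls.length) :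
    (pref s ls).getD i 0 = s + cnt (ls.take i) := by
  induction ls generalizing s i with
  | nil => simp at h
  | cons l ls ih =>
    cases i with
    | zero => simp [pref, cnt]
    | succ j =>
      simp only [pref, List.getD_cons_succ, List.take_succ_cons, cnt]
      rw [ih _ j (by simpa using h)]
      ring

theorem pref_length (s : Int) (ls : List String) : (pref s ls).length = ls.length := by
  induction ls generalizing s with
  | nil => simp [pref]
  | cons l ls ih => simp [pref, ih]

theorem pyGetD_pref (ls : List String) (i : Int) (h0 : 0 ≤ i) (h1 : i < (ls.length : Int)) :
    PySem.List.pyGetD (pref 1 ls) i 0 = 1 + cnt (ls.take i.toNat) := by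
  have hi : i.toNat < ls.length := by omega
  rw [PySem.List.pyGetD_eq_getElem (pref 1 ls) 0 h0 (by rw [pref_length]; omega)]
  rw [List.getElem_eq_getD]
  exact pref_getD ls 1 i.toNat hi

-- ===== VERDICT (by name: the statement is the Claim_ definition above) =====
theorem status_line_range_py_spec : Claim_equal_status_line_range_py := by
  intro tl ts cr w _
  unfold Spec_status_line_range_py status_line_range_py status_line_range_py_alt
  by_cases hnil : tl = []
  · simp [hnil]
  · simp only [if_neg hnil]
    cases w with
    | false => simp
    | true =>
      simp only [Bool.not_true, if_neg (by decide : ¬ (false = true))]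
      rw [foldA]
      have hlen : 1 ≤ (tl.length : Int) := by
        have := List.length_pos_iff.mpr hnil
        omega
      set cs := max 0 (min ts ((tl.length : Int) - 1)) with hcs
      set ce := max cs (min ((tl.length : Int) - 1) (cs + max 1 cr - 1)) with hce
      have hcs0 : 0 ≤ cs := le_max_left _ _
      have hcs1 : cs < (tl.length : Int) := by
        have : min ts ((tl.length : Int) - 1) ≤ (tl.length : Int) - 1 := min_le_right _ _
        omega
      have hce0 : 0 ≤ ce := le_trans hcs0 (le_max_left _ _)
      have hce1 : ce < (tl.length : Int) := by
        have h1 : min ((tl.length : Int) - 1) (cs + max 1 cr - 1) ≤ (tl.length : Int) - 1 :=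
          min_le_left _ _
        have := max_le (by omega : cs ≤ (tl.length : Int) - 1) h1
        omega
      simp only [List.nil_append]
      rw [pyGetD_pref tl cs hcs0 hcs1, pyGetD_pref tl ce hce0 hce1]
      rw [PySem.List.slice_to _ hcs0, PySem.List.slice_to _ hce0]
      rw [termSum_eq, termSum_eq, termSum_eq]
      simp only [Prod.mk.injEq]
      exact ⟨trivial, trivial, by split <;> omega⟩
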